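-- pv_equiv track=rewrite | github.com/lnfamy/InterviewCodingQuestionsAndMySolutions | LeetCode/Discuss/Minimum number of operations to reverse string.py | solution
-- ===== SOURCE A (Python) =====
-- def solution(s: str) -> int:
--     n = len(s)
--
--     # we're going to compare s to the reverse of s using two pointers,
--     # and make note of all of the indices where s matches reverse s.
--     res = 0
--     j = n - 1
--     for i in range(n):
--         if s[i] == s[j]:
--             res += 1
--         j -= 1
--
--     return n - res
-- ===== SOURCE B (Python) =====
-- def solution(s: str) -> int:
--     n = len(s)
--     bad = 0
--     for i in range(n // 2):
--         if s[i] != s[n - 1 - i]: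
--             bad += 1
--     return 2 * bad
-- ===== Notes on version B (the rewrite author's own statement) =====
-- stated objective: faster
-- what changed: B compares only the first n//2 mirror pairs and returns twice the mismatch count, instead of A's full-length pass that counts matches while stepping a second pointer and subtracts from n.
import Mathlib
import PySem

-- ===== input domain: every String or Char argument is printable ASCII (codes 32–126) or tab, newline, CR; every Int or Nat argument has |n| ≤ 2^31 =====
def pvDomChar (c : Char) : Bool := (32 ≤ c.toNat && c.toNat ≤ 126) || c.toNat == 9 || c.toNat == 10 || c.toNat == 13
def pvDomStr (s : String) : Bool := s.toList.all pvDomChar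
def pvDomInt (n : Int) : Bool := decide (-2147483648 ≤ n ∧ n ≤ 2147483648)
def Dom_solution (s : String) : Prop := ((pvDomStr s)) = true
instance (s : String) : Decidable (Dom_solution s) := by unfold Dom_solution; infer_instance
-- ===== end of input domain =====

-- B replaces A's full-length mirror pass (count matches with a second pointer, return n - res)
-- by counting mismatched pairs over the first half only and returning twice that count.

-- ===== PORT A =====
-- literal port of A: fold over range(n) with state (res, j), j a second pointer stepped down;
-- s[i] / s[j] is PySem.Str.pyGet? (always in range here, so Python never raises)
def solution (s : String) : Int :=
  let n : Int := (s.toList.length : Int)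
  let st := (PySem.List.pyRange 0 n 1).foldl
    (fun (st : Int × Int) i =>
      (if PySem.Str.pyGet? s i = PySem.Str.pyGet? s st.2 then st.1 + 1 else st.1, st.2 - 1))
    (0, n - 1)
  n - st.1

-- ===== PORT B =====
-- literal port of Source B: count mismatched mirror pairs over range(n // 2), return 2 * bad
def solution_alt (s : String) : Int :=
  let l := s.toList
  let n := l.length
  let bad := (List.range (n / 2)).foldl
    (fun (acc : Int) i => if l.getD i ' ' ≠ l.getD (n - 1 - i) ' ' then acc + 1 else acc) (0 : Int)
  2 * bad

-- ===== PRECONDITION & SPEC =====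
def Spec_solution (s : String) (out : Int) : Prop := out = solution_alt s
instance (s : String) (out : Int) : Decidable (Spec_solution s out) := by unfold Spec_solution; infer_instance

-- ===== CLAIM (what is proved, stated in full; the proofs are below) =====
def Claim_equal_solution : Prop := ∀ (s : String), Dom_solution s → Spec_solution s (solution s)

-- ===== LEMMAS AND PROOFS =====

-- mismatch weight of index i (with n = l.length fixed)
def mmW (l : List Char) (i : Nat) : Int :=
  if l.getD i ' ' = l.getD (l.length - 1 - i) ' ' then 0 else 1

def mmSum (l : List Char) (k : Nat) : Int := ∑ i ∈ Finset.range k, mmW l i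

-- a counting fold is a sum
lemma foldl_if_sum (p : Nat → Prop) [DecidablePred p] (k : Nat) (a : Int) :
    (List.range k).foldl (fun acc i => if p i then acc + 1 else acc) a
      = a + ∑ i ∈ Finset.range k, (if p i then (1 : Int) else 0) := by
  induction k with
  | zero => simp
  | succ k ih =>
      rw [List.range_succ, List.foldl_append, ih, Finset.sum_range_succ]
      by_cases h : p k
      · simp [h]; ring
      · simp [h]

-- B's port equals twice the half-range mismatch sum
lemma alt_eq (s : String) :
    solution_alt s = 2 * mmSum s.toList (s.toList.length / 2) := by
  unfold solution_alt mmSum mmW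
  have := foldl_if_sum
    (fun i => ¬ (s.toList.getD i ' ' = s.toList.getD (s.toList.length - 1 - i) ' '))
    (s.toList.length / 2) 0
  simp only [this, zero_add]
  congr 1
  apply Finset.sum_congr rfl
  intro i _
  simp [ite_not]

-- invariant for A's fold: after k steps the state is (match count over range k, n-1-k)
lemma a_fold (l : List Char) (k : Nat) (hk : k ≤ l.length) :
    (List.range k).foldl
      (fun (st : Int × Int) (i : Nat) =>
        (if PySem.List.pyGet? l (i : Int) = PySem.List.pyGet? l st.2 then st.1 + 1 else st.1, st.2 - 1))
      (0, (l.length : Int) - 1)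
    = (∑ i ∈ Finset.range k, (1 - mmW l i), (l.length : Int) - 1 - k) := by
  induction k with
  | zero => simp
  | succ k ih =>
      have hk' : k ≤ l.length := by omega
      have hlt : k < l.length := by omega
      have hlt2 : l.length - 1 - k < l.length := by omega
      rw [List.range_succ, List.foldl_append, ih hk']
      simp only [List.foldl_cons, List.foldl_nil]
      rw [Finset.sum_range_succ]
      have hidx : (l.length : Int) - 1 - (k : Int) = ((l.length - 1 - k : Nat) : Int) := by omega
      rw [hidx]
      simp only [PySem.List.pyGet?_natCast]
      have h1 : l[k]? = some (l.getD k ' ') := by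
        rw [List.getD_eq_getElem?_getD, List.getElem?_eq_getElem hlt]; rfl
      have h2 : l[(l.length - 1 - k)]? = some (l.getD (l.length - 1 - k) ' ') := by
        rw [List.getD_eq_getElem?_getD, List.getElem?_eq_getElem hlt2]; rfl
      rw [h1, h2]
      simp only [Option.some.injEq, Prod.mk.injEq]
      constructor
      · by_cases h : l.getD k ' ' = l.getD (l.length - 1 - k) ' '
        · rw [if_pos h]; unfold mmW; rw [if_pos h]; ring
        · rw [if_neg h]; unfold mmW; rw [if_neg h]; ring
      · omega

-- A's port equals the full-range mismatch sum
lemma a_eq (s : String) : solution s = mmSum s.toList s.toList.length := by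
  simp only [solution, mmSum]
  rw [PySem.List.pyRange_zero_natCast, List.foldl_map]
  have hg : ∀ (i : Int), PySem.Str.pyGet? s i = PySem.List.pyGet? s.toList i := by
    intro i; rfl
  simp only [hg]
  rw [a_fold s.toList s.toList.length le_rfl]
  have hsub : ∑ i ∈ Finset.range s.toList.length, (1 - mmW s.toList i)
      = (s.toList.length : Int) - ∑ i ∈ Finset.range s.toList.length, mmW s.toList i := by
    rw [Finset.sum_sub_distrib]; simp
  rw [hsub]; ring

-- mmW is symmetric under reflection
lemma mmW_reflect (l : List Char) (i : Nat) (hi : i < l.length) :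
    mmW l (l.length - 1 - i) = mmW l i := by
  unfold mmW
  have h : l.length - 1 - (l.length - 1 - i) = i := by omega
  rw [h]
  by_cases h2 : l.getD i ' ' = l.getD (l.length - 1 - i) ' '
  · rw [if_pos h2, if_pos h2.symm]
  · rw [if_neg h2, if_neg (fun h3 => h2 h3.symm)]

-- half-range doubling: the full mismatch sum is twice the half sum
lemma mmSum_double (l : List Char) : mmSum l l.length = 2 * mmSum l (l.length / 2) := by
  set n := l.length with hn
  set h := n / 2 with hh
  unfold mmSum
  have hsplit : ∑ i ∈ Finset.range n, mmW l i
      = (∑ i ∈ Finset.range h, mmW l i) + ∑ i ∈ Finset.Ico h n, mmW l i := by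
    rw [Finset.range_eq_Ico, ← Finset.sum_Ico_consecutive (mmW l) (Nat.zero_le h) (by omega)]
  have hupper : ∑ i ∈ Finset.Ico h n, mmW l i = ∑ i ∈ Finset.range (n - h), mmW l (n - 1 - i) := by
    rw [Finset.sum_Ico_eq_sum_range]
    rw [← Finset.sum_range_reflect (fun i => mmW l (h + i)) (n - h)]
    apply Finset.sum_congr rfl
    intro i hi
    simp only [Finset.mem_range] at hi
    congr 1
    omega
  have hrefl : ∀ i ∈ Finset.range (n - h), mmW l (n - 1 - i) = mmW l i := by
    intro i hi
    simp only [Finset.mem_range] at hi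
    exact hn ▸ mmW_reflect l i (by omega)
  rw [hsplit, hupper, Finset.sum_congr rfl hrefl]
  rcases Nat.even_or_odd n with he | ho
  · rw [Nat.even_iff] at he
    have : n - h = h := by omega
    rw [this]; ring
  · rw [Nat.odd_iff] at ho
    have hnh : n - h = h + 1 := by omega
    have hmid : mmW l h = 0 := by
      unfold mmW
      have hmid' : n - 1 - h = h := by omega
      rw [← hn, hmid', if_pos rfl]
    rw [hnh, Finset.sum_range_succ, hmid]; ring

-- ===== VERDICT (by name: the statement is the Claim_ definition above) =====
theorem solution_spec : Claim_equal_solution := by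
  intro s _
  unfold Spec_solution
  rw [a_eq, alt_eq, mmSum_double]
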